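-- pv_equiv track=rewrite | github.com/sewwwyyyy/Fruit-Package-Inspection | main.py | extract_weight
-- ===== SOURCE A (Python) =====
-- def extract_weight(words):
--  weight = "n/a"
--  preference_order = ["g", "ge", "kg", "9"]
--
--  for preferred_ending in preference_order:
--     for word in words:
--         if word.endswith(preferred_ending):
--             valid = True
--             digits = word[:-len(preferred_ending)]  # Get the part of the word without the preferred ending
--             if not digits or not digits.replace("-", "").isdigit():
--                 valid = False
--             if valid:
--                 weight = digits + preferred_ending
--                 return weight
--
--  return weight
-- ===== SOURCE B (Python) =====
-- def extract_weight(words):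
--     preference_order = ["g", "ge", "kg", "9"]
--     best = {}
--     for word in words:
--         for ending in preference_order:
--             if ending not in best and word.endswith(ending):
--                 digits = word[:-len(ending)]
--                 if digits and digits.replace("-", "").isdigit():
--                     best[ending] = digits + ending
--     for ending in preference_order:
--         if ending in best:
--             return best[ending]
--     return "n/a"
-- ===== Notes on version B (the rewrite author's own statement) =====
-- stated objective: alternative
-- what changed: Replaces A's four priority-ordered scans of the word list (early return on first hit) by a single pass over the words that records, per preferred ending, the first word passing the digit check in a dict, followed by a lookup in preference order.
import Mathlib
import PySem

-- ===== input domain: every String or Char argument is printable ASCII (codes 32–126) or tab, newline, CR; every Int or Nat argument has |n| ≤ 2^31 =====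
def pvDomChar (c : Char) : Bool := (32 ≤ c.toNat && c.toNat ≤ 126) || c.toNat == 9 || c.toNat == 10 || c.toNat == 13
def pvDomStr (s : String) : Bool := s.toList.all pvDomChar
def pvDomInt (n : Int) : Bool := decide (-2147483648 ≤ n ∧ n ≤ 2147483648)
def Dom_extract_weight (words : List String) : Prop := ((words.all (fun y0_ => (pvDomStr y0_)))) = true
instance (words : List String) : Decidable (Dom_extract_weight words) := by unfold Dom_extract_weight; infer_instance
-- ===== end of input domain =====

-- B replaces A's four priority-ordered scans (early return on first hit) with one pass over
-- the words filling a dict (first valid word per preferred ending) plus a preference-order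
-- lookup; an alternative decomposition with the identical return value.

-- ===== PORT A =====
-- inner loop 'for word in words: …' for a fixed preferred ending (early return = some)
def ewScan (e : String) : List String → Option String
  | [] => none
  | w :: ws =>
    if PySem.Str.endswith w e = true then
      let digits := PySem.Str.slice w none (some (-(PySem.Str.len e)))
      if digits = "" ∨ PySem.Str.strIsdigit (PySem.Str.replace digits "-" "") = false then
        ewScan e ws
      else some (digits ++ e)
    else ewScan e ws

-- outer loop 'for preferred_ending in preference_order: …'
def ewLoop (words : List String) : List String → Option String
  | [] => none
  | e :: rest =>
    match ewScan e words with
    | some r => some r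
    | none => ewLoop words rest

def extract_weight (words : List String) : String :=
  match ewLoop words ["g", "ge", "kg", "9"] with
  | some r => r
  | none => "n/a"

-- ===== PORT B =====
-- body of B's inner loop: try one preferred ending on one word, if not yet in the dict
def altStep (w : String) (d : PySem.Dict String String) (e : String) : PySem.Dict String String :=
  if d.get? e = none ∧ PySem.Str.endswith w e = true then
    let digits := PySem.Str.slice w none (some (-(PySem.Str.len e)))
    if digits ≠ "" ∧ PySem.Str.strIsdigit (PySem.Str.replace digits "-" "") = true then
      d.insert e (digits ++ e)
    else d
  else d

-- per-word update of the dict ('for ending in preference_order: …')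
def altUpd (d : PySem.Dict String String) (w : String) : PySem.Dict String String :=
  ["g", "ge", "kg", "9"].foldl (altStep w) d

-- final lookup in preference order
def altPick (d : PySem.Dict String String) : List String → String
  | [] => "n/a"
  | e :: rest =>
    match d.get? e with
    | some r => r
    | none => altPick d rest

def extract_weight_alt (words : List String) : String :=
  altPick (words.foldl altUpd PySem.Dict.empty) ["g", "ge", "kg", "9"]

-- ===== PRECONDITION & SPEC =====
def Spec_extract_weight (words : List String) (out : String) : Prop := out = extract_weight_alt words
instance (words : List String) (out : String) : Decidable (Spec_extract_weight words out) := by unfold Spec_extract_weight; infer_instance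

-- ===== CLAIM (what is proved, stated in full; the proofs are below) =====
def Claim_equal_extract_weight : Prop := ∀ (words : List String), Dom_extract_weight words → Spec_extract_weight words (extract_weight words)

-- ===== LEMMAS AND PROOFS =====
-- the per-word, per-ending check both programs perform, as an Option
def ewCheck (e w : String) : Option String :=
  if PySem.Str.endswith w e = true then
    let digits := PySem.Str.slice w none (some (-(PySem.Str.len e)))
    if digits ≠ "" ∧ PySem.Str.strIsdigit (PySem.Str.replace digits "-" "") = true then
      some (digits ++ e)
    else none
  else none

theorem ewScan_cons (e w : String) (ws : List String) :
    ewScan e (w :: ws) = (ewCheck e w).or (ewScan e ws) := by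
  simp only [ewScan, ewCheck]
  split_ifs with h1 h2 h3 <;> simp_all

theorem altStep_get? (w : String) (d : PySem.Dict String String) (e e' : String) :
    (altStep w d e').get? e = if e = e' then (d.get? e).or (ewCheck e' w) else d.get? e := by
  by_cases hee : e = e'
  · subst hee
    simp only [altStep, ewCheck]
    cases hd : d.get? e with
    | some v => simp [hd]
    | none =>
      simp only [true_and, Option.none_or]
      split_ifs with h1 h2 <;>
        simp_all [PySem.Dict.get?_insert_self]
  · simp only [altStep, if_neg hee]
    split_ifs with h1 h2
    · exact PySem.Dict.get?_insert_of_ne _ _ hee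
    · rfl
    · rfl

theorem fold_get (ws : List String) (d : PySem.Dict String String) (e : String)
    (he : e ∈ (["g", "ge", "kg", "9"] : List String)) :
    (ws.foldl altUpd d).get? e = (d.get? e).or (ewScan e ws) := by
  induction ws generalizing d with
  | nil => simp [ewScan]
  | cons w ws ih =>
    rw [List.foldl_cons, ih, ewScan_cons, ← Option.or_assoc]
    congr 1
    fin_cases he <;> simp [altUpd, altStep_get?]

theorem extract_weight_spec : Claim_equal_extract_weight := by
  unfold Claim_equal_extract_weight Spec_extract_weight
  intro words _
  have h : ∀ e ∈ (["g", "ge", "kg", "9"] : List String),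
      (words.foldl altUpd PySem.Dict.empty).get? e = ewScan e words := by
    intro e he
    rw [fold_get words _ e he]
    simp [PySem.Dict.empty, PySem.Dict.get?]
  simp only [extract_weight, extract_weight_alt, ewLoop, altPick]
  rw [h "g" (by simp), h "ge" (by simp), h "kg" (by simp), h "9" (by simp)]
  cases ewScan "g" words <;> cases ewScan "ge" words <;>
    cases ewScan "kg" words <;> cases ewScan "9" words <;> rfl
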